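-- pv_equiv track=rewrite | github.com/maryliag/otel-health | run_analysis.py | parse_shared_args
-- ===== SOURCE A (Python) =====
-- def parse_shared_args(
--     argv: list[str],
-- ) -> tuple[list[str], list[str], list[str], bool]:
--     """
--     Split CLI args into those relevant for each module.
--     All modules share --org, --output-dir, --cache-dir.
--     collector.py additionally accepts --teams-file.
--     activity.py additionally accepts --teams-file, --weeks, --top-repos.
--     --skip-activity suppresses step 3.
--     """
--     teams_args: list[str] = []
--     collector_args: list[str] = []
--     activity_args: list[str] = []
--     skip_activity = False
--     i = 0
--     while i < len(argv):
--         arg = argv[i]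
--         if arg in ("--org", "--output-dir", "--cache-dir"):
--             val = argv[i + 1] if i + 1 < len(argv) else ""
--             teams_args += [arg, val]
--             collector_args += [arg, val]
--             activity_args += [arg, val]
--             i += 2
--         elif arg == "--teams-file":
--             val = argv[i + 1] if i + 1 < len(argv) else ""
--             collector_args += [arg, val]
--             activity_args += [arg, val]
--             i += 2
--         elif arg in ("--weeks", "--top-repos"):
--             val = argv[i + 1] if i + 1 < len(argv) else ""
--             activity_args += [arg, val]
--             i += 2
--         elif arg == "--skip-activity":
--             skip_activity = True
--             i += 1
--         else:
--             i += 1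
--     return teams_args, collector_args, activity_args, skip_activity
-- ===== SOURCE B (Python) =====
-- def parse_shared_args(
--     argv: list[str],
-- ) -> tuple[list[str], list[str], list[str], bool]:
--     """Two-phase rewrite: tokenize argv once into (flag, value) pairs plus the
--     skip flag, then build each module's list by projecting the pair list."""
--     value_flags = (
--         "--org", "--output-dir", "--cache-dir",
--         "--teams-file", "--weeks", "--top-repos",
--     )
--     pairs: list[tuple[str, str]] = []
--     skip_activity = False
--     i = 0
--     n = len(argv)
--     while i < n:
--         arg = argv[i]
--         if arg in value_flags:
--             pairs.append((arg, argv[i + 1] if i + 1 < n else ""))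
--             i += 2
--         else:
--             if arg == "--skip-activity":
--                 skip_activity = True
--             i += 1
--
--     def project(flags: tuple[str, ...]) -> list[str]:
--         return [x for f, v in pairs if f in flags for x in (f, v)]
--
--     shared = ("--org", "--output-dir", "--cache-dir")
--     return (
--         project(shared),
--         project(shared + ("--teams-file",)),
--         project(value_flags),
--         skip_activity,
--     )
-- ===== Notes on version B (the rewrite author's own statement) =====
-- stated objective: alternative
-- what changed: Replaces the single interleaved loop that appends to all three output lists at once by a two-phase design: one tokenizing scan producing (flag,value) pairs plus the skip flag, then three independent projections of that pair list build the per-module lists.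
import Mathlib
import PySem

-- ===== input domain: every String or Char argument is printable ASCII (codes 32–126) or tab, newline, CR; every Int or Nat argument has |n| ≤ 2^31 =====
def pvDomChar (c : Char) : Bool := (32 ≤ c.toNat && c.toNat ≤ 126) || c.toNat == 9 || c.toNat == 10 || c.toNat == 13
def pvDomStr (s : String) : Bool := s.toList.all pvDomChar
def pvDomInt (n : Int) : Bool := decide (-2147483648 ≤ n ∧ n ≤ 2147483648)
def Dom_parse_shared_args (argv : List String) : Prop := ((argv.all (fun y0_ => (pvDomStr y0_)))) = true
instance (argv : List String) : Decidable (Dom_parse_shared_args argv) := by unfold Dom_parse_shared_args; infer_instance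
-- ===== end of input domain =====

-- B re-implements A's single interleaved while-loop as a tokenize pass plus three projections; same value, no speed claim.

-- ===== PORT A =====
-- A's while-loop over index i, ported as recursion over the remaining suffix of argv
-- (i → the suffix argv.drop i); the accumulators are the four loop variables.
def parseLoopA : List String → List String → List String → List String → Bool →
    List String × List String × List String × Bool
  | [], t, c, a, s => (t, c, a, s)
  | arg :: rest, t, c, a, s =>
    if arg = "--org" ∨ arg = "--output-dir" ∨ arg = "--cache-dir" then
      -- val = argv[i+1] if i+1 < len(argv) else ""
      let val := rest.headD ""
      parseLoopA rest.tail (t ++ [arg, val]) (c ++ [arg, val]) (a ++ [arg, val]) s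
    else if arg = "--teams-file" then
      let val := rest.headD ""
      parseLoopA rest.tail t (c ++ [arg, val]) (a ++ [arg, val]) s
    else if arg = "--weeks" ∨ arg = "--top-repos" then
      let val := rest.headD ""
      parseLoopA rest.tail t c (a ++ [arg, val]) s
    else if arg = "--skip-activity" then
      parseLoopA rest t c a true
    else
      parseLoopA rest t c a s
termination_by l => l.length
decreasing_by all_goals (simp [List.length_tail]; try omega)

def parse_shared_args (argv : List String) : List String × List String × List String × Bool :=
  parseLoopA argv [] [] [] false

-- ===== PORT B =====
-- Phase 1: tokenize argv into (flag, value) pairs + skip flag.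
def pvValueFlag (arg : String) : Bool :=
  arg ∈ ["--org", "--output-dir", "--cache-dir", "--teams-file", "--weeks", "--top-repos"]

def pvTokenize : List String → List (String × String) × Bool
  | [] => ([], false)
  | arg :: rest =>
    if pvValueFlag arg then
      let r := pvTokenize rest.tail
      ((arg, rest.headD "") :: r.1, r.2)
    else if arg = "--skip-activity" then
      let r := pvTokenize rest
      (r.1, true)
    else
      pvTokenize rest
termination_by l => l.length
decreasing_by all_goals (simp [List.length_tail]; try omega)

-- Phase 2: project the pair list onto a flag set, flattening each pair.
def pvProject (flags : List String) (pairs : List (String × String)) : List String :=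
  (pairs.filter (fun p => p.1 ∈ flags)).flatMap (fun p => [p.1, p.2])

def parse_shared_args_alt (argv : List String) : List String × List String × List String × Bool :=
  let r := pvTokenize argv
  let shared := ["--org", "--output-dir", "--cache-dir"]
  (pvProject shared r.1,
   pvProject (shared ++ ["--teams-file"]) r.1,
   pvProject ["--org", "--output-dir", "--cache-dir", "--teams-file", "--weeks", "--top-repos"] r.1,
   r.2)

-- ===== PRECONDITION & SPEC =====
def Spec_parse_shared_args (argv : List String) (out : List String × List String × List String × Bool) : Prop := out = parse_shared_args_alt argv
instance (argv : List String) (out : List String × List String × List String × Bool) : Decidable (Spec_parse_shared_args argv out) := by unfold Spec_parse_shared_args; infer_instance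

-- ===== CLAIM (what is proved, stated in full; the proofs are below) =====
def Claim_equal_parse_shared_args : Prop := ∀ (argv : List String), Dom_parse_shared_args argv → Spec_parse_shared_args argv (parse_shared_args argv)

-- ===== LEMMAS AND PROOFS =====

lemma pvProject_cons (flags : List String) (p : String × String) (ps : List (String × String)) :
    pvProject flags (p :: ps) =
      (if p.1 ∈ flags then [p.1, p.2] else []) ++ pvProject flags ps := by
  simp [pvProject, List.filter_cons]
  split_ifs with h
  · simp
  · rfl

lemma parseLoopA_eq (l t c a : List String) (s : Bool) :
    parseLoopA l t c a s =
      (t ++ pvProject ["--org", "--output-dir", "--cache-dir"] (pvTokenize l).1,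
       c ++ pvProject ["--org", "--output-dir", "--cache-dir", "--teams-file"] (pvTokenize l).1,
       a ++ pvProject ["--org", "--output-dir", "--cache-dir", "--teams-file", "--weeks", "--top-repos"] (pvTokenize l).1,
       s || (pvTokenize l).2) := by
  induction l, t, c, a, s using parseLoopA.induct with
  | case1 t c a s => simp [parseLoopA, pvTokenize, pvProject]
  | case2 arg rest t c a s h val ih =>
    have hval : val = rest.headD "" := rfl
    rcases h with h | h | h <;> subst h <;>
      simpa [parseLoopA, pvTokenize, pvValueFlag, pvProject_cons, hval] using ih
  | case3 rest t c a s val h1 ih =>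
    have hval : val = rest.headD "" := rfl
    simpa [parseLoopA, pvTokenize, pvValueFlag, pvProject_cons, hval] using ih
  | case4 arg rest t c a s h1 h2 h val ih =>
    have hval : val = rest.headD "" := rfl
    rcases h with h | h <;> subst h <;>
      simpa [parseLoopA, pvTokenize, pvValueFlag, pvProject_cons, hval] using ih
  | case5 rest t c a s h1 h2 h3 ih =>
    simp [parseLoopA, pvTokenize, pvValueFlag, ih]
  | case6 arg rest t c a s h1 h2 h3 h4 ih =>
    have hv : pvValueFlag arg = false := by
      simp only [pvValueFlag]
      simp only [not_or] at h1 h3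
      simp [h1.1, h1.2.1, h1.2.2, h2, h3.1, h3.2]
    simp [parseLoopA, pvTokenize, hv, h1, h2, h3, h4, ih]

-- ===== VERDICT (by name: the statement is the Claim_ definition above) =====
theorem parse_shared_args_spec : Claim_equal_parse_shared_args := by
  intro argv _
  unfold Spec_parse_shared_args parse_shared_args parse_shared_args_alt
  rw [parseLoopA_eq]
  simp
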